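-- pv_equiv track=rewrite | github.com/HaoyunHong/QAG-reimplementation | DataLoader.py | compute_inverse_pairs
-- ===== SOURCE A (Python) =====
-- def compute_inverse_pairs(seq1, seq2, overlap, max_seq_len):
--     look_up = {}
--     new_seq1 = []
--     new_seq2 = []
--     for w in seq1:
--         if w in overlap:
--             look_up[w] = len(look_up) + 1
--             new_seq1.append(look_up[w])
--     for w in seq2:
--         if w in overlap:
--             new_seq2.append(look_up[w])
--     result = 0
--     for i in range(len(new_seq2)):
--         for j in range(i, len(new_seq2)):
--             if new_seq2[j] < i + 1:
--                 result -= 1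
--     return result, \
--            [0] * (max_seq_len - len(new_seq1)) + new_seq1 if len(new_seq1) <= max_seq_len else new_seq1[
--                                                                                                :max_seq_len], \
--            [0] * (max_seq_len - len(new_seq2)) + new_seq2 if len(new_seq2) <= max_seq_len else new_seq2[
--                                                                                                :max_seq_len]
-- ===== SOURCE B (Python) =====
-- def compute_inverse_pairs(seq1, seq2, overlap, max_seq_len):
--     ov = set(overlap)
--     idx = {}
--     new_seq1 = []
--     for w in seq1:
--         if w in ov:
--             v = len(idx) + 1
--             idx[w] = v
--             new_seq1.append(v)
--     result = 0
--     new_seq2 = []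
--     for w in seq2:
--         if w in ov:
--             v = idx[w]
--             j = len(new_seq2)
--             if v <= j:
--                 result -= j - v + 1
--             new_seq2.append(v)
--
--     def pad(xs):
--         if len(xs) <= max_seq_len:
--             return [0] * (max_seq_len - len(xs)) + xs
--         return xs[:max_seq_len]
--
--     return result, pad(new_seq1), pad(new_seq2)
-- ===== Notes on version B (the rewrite author's own statement) =====
-- stated objective: faster
-- what changed: replaces the O(n^2) nested pair-counting loops with a single fused pass that subtracts max(0, j - v + 1) in closed form while mapping seq2, and uses a set for overlap membership
import Mathlib
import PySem

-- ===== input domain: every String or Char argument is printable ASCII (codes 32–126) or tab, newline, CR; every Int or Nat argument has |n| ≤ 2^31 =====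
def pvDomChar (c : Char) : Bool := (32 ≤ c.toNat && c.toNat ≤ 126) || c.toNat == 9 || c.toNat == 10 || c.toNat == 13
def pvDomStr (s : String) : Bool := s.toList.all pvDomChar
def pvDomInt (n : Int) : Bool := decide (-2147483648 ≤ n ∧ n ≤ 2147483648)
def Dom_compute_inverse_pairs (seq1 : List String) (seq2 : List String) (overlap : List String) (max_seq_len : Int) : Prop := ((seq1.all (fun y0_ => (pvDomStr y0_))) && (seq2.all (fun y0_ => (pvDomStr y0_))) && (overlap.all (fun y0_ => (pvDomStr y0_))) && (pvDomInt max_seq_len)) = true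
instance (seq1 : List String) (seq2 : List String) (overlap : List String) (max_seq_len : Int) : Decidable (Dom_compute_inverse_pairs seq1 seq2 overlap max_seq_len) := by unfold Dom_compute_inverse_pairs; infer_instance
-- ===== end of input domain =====

-- B replaces A's O(n^2) nested pair-counting loops with one fused pass subtracting
-- max(0, j - v + 1) in closed form while mapping seq2 (objective: faster).

-- ===== PORT A =====
-- the nested counting loops of A (result starts at 0 and is decremented)
def cntA (a : List Int) : Int :=
  (PySem.List.pyRange 0 (a.length : Int) 1).foldl
    (fun r i => (PySem.List.pyRange i (a.length : Int) 1).foldl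
      (fun r j => if PySem.List.pyGetD a j 0 < i + 1 then r - 1 else r) r) 0

-- first loop of A: look_up[w] = len(look_up)+1; new_seq1.append(look_up[w])
def pvLoop1A (overlap : List String) (seq1 : List String) : PySem.Dict String Int × List Int :=
  seq1.foldl (fun st w =>
    if overlap.contains w then
      let lu := st.1.insert w ((st.1.size : Int) + 1)
      (lu, st.2 ++ [lu.getD w 0])
    else st) (PySem.Dict.empty, [])

-- second loop of A: new_seq2.append(look_up[w]); the lookup is total (getD 0) — Pre_ excludes the KeyError case
def pvSeq2A (overlap : List String) (look_up : PySem.Dict String Int) (seq2 : List String) : List Int :=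
  seq2.foldl (fun l w => if overlap.contains w then l ++ [look_up.getD w 0] else l) []

def compute_inverse_pairs (seq1 : List String) (seq2 : List String) (overlap : List String) (max_seq_len : Int) : Int × List Int × List Int :=
  let st := pvLoop1A overlap seq1
  let new_seq1 := st.2
  let new_seq2 := pvSeq2A overlap st.1 seq2
  (cntA new_seq2,
   if (new_seq1.length : Int) ≤ max_seq_len then
     List.replicate (max_seq_len - (new_seq1.length : Int)).toNat 0 ++ new_seq1
   else PySem.List.slice new_seq1 none (some max_seq_len),
   if (new_seq2.length : Int) ≤ max_seq_len then
     List.replicate (max_seq_len - (new_seq2.length : Int)).toNat 0 ++ new_seq2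
   else PySem.List.slice new_seq2 none (some max_seq_len))

-- ===== PORT B =====
def pvPadB (m : Int) (xs : List Int) : List Int :=
  if (xs.length : Int) ≤ m then List.replicate (m - (xs.length : Int)).toNat 0 ++ xs
  else PySem.List.slice xs none (some m)

-- B's first loop: v = len(idx)+1; idx[w] = v; new_seq1.append(v)
def pvLoop1B (ov : PySem.Set String) (seq1 : List String) : PySem.Dict String Int × List Int :=
  seq1.foldl (fun st w =>
    if PySem.Set.contains ov w then
      (st.1.insert w ((st.1.size : Int) + 1), st.2 ++ [(st.1.size : Int) + 1])
    else st) (PySem.Dict.empty, [])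

-- B's fused second loop: map w and subtract j - v + 1 when v ≤ j, in one pass
def pvLoop2B (ov : PySem.Set String) (idx : PySem.Dict String Int) (seq2 : List String) : Int × List Int :=
  seq2.foldl (fun rs w =>
    if PySem.Set.contains ov w then
      ((if idx.getD w 0 ≤ (rs.2.length : Int) then rs.1 - ((rs.2.length : Int) - idx.getD w 0 + 1) else rs.1),
       rs.2 ++ [idx.getD w 0])
    else rs) (0, [])

def compute_inverse_pairs_alt (seq1 : List String) (seq2 : List String) (overlap : List String) (max_seq_len : Int) : Int × List Int × List Int :=
  let ov := PySem.Set.ofList overlap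
  let st := pvLoop1B ov seq1
  let rs := pvLoop2B ov st.1 seq2
  (rs.1, pvPadB max_seq_len st.2, pvPadB max_seq_len rs.2)

-- ===== PRECONDITION & SPEC =====
-- Pre_ excludes exactly the inputs where A raises KeyError: a word of seq2 that is in
-- overlap but never occurred in seq1 (so it is not a key of look_up); B raises there too.
def Pre_compute_inverse_pairs (seq1 : List String) (seq2 : List String) (overlap : List String) (max_seq_len : Int) : Prop :=
  ∀ w ∈ seq2, w ∈ overlap → w ∈ seq1
instance (seq1 : List String) (seq2 : List String) (overlap : List String) (max_seq_len : Int) : Decidable (Pre_compute_inverse_pairs seq1 seq2 overlap max_seq_len) := by unfold Pre_compute_inverse_pairs; infer_instance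
def pvWitness_compute_inverse_pairs : List String × List String × List String × Int := (["a", "b"], ["b", "a", "b"], ["a", "b", "c"], 5)

def Spec_compute_inverse_pairs (seq1 : List String) (seq2 : List String) (overlap : List String) (max_seq_len : Int) (out : Int × List Int × List Int) : Prop := out = compute_inverse_pairs_alt seq1 seq2 overlap max_seq_len
instance (seq1 : List String) (seq2 : List String) (overlap : List String) (max_seq_len : Int) (out : Int × List Int × List Int) : Decidable (Spec_compute_inverse_pairs seq1 seq2 overlap max_seq_len out) := by unfold Spec_compute_inverse_pairs; infer_instance

-- ===== CLAIM (what is proved, stated in full; the proofs are below) =====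
def Claim_equal_compute_inverse_pairs : Prop := ∀ (seq1 : List String) (seq2 : List String) (overlap : List String) (max_seq_len : Int), Dom_compute_inverse_pairs seq1 seq2 overlap max_seq_len → Pre_compute_inverse_pairs seq1 seq2 overlap max_seq_len → Spec_compute_inverse_pairs seq1 seq2 overlap max_seq_len (compute_inverse_pairs seq1 seq2 overlap max_seq_len)

-- ===== LEMMAS AND PROOFS =====

-- a decrement-if loop is the initial value plus a (-1/0)-sum
theorem pv_foldl_decr (c : Int → Prop) [DecidablePred c] (L : List Int) (r : Int) :
    L.foldl (fun r j => if c j then r - 1 else r) r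
      = r + (L.map (fun j => if c j then (-1 : Int) else 0)).sum := by
  induction L generalizing r with
  | nil => simp
  | cons x L ih =>
    simp only [List.foldl_cons, List.map_cons, List.sum_cons]
    split_ifs <;> rw [ih] <;> ring

-- A's nested loops as a double sum
theorem cntA_eq_sum (a : List Int) :
    cntA a = ((PySem.List.pyRange 0 (a.length : Int) 1).map (fun i =>
        ((PySem.List.pyRange i (a.length : Int) 1).map
          (fun j => if PySem.List.pyGetD a j 0 < i + 1 then (-1 : Int) else 0)).sum)).sum := by
  unfold cntA
  rw [PySem.List.foldl_congr_mem (PySem.List.pyRange 0 (a.length : Int) 1)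
      (fun r i => (PySem.List.pyRange i (a.length : Int) 1).foldl
        (fun r j => if PySem.List.pyGetD a j 0 < i + 1 then r - 1 else r) r)
      (fun r i => r + ((PySem.List.pyRange i (a.length : Int) 1).map
        (fun j => if PySem.List.pyGetD a j 0 < i + 1 then (-1 : Int) else 0)).sum)
      0 (fun acc i _ => pv_foldl_decr _ _ acc),
     PySem.List.foldl_add]
  ring

-- sum of the indicator (v ≤ i) over i ∈ range(m), for 0 ≤ v
theorem pv_sum_ind (m : Nat) (v : Int) (hv : 0 ≤ v) :
    ((PySem.List.pyRange 0 (m : Int) 1).map (fun i => if v < i + 1 then (-1 : Int) else 0)).sum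
      = -(max ((m : Int) - v) 0) := by
  induction m with
  | zero => simp [PySem.List.pyRange_one_eq_nil]; omega
  | succ m ih =>
    have hc : ((m + 1 : Nat) : Int) = (m : Int) + 1 := by push_cast; ring
    rw [hc, PySem.List.pyRange_one_succ_right (by positivity), List.map_append, List.sum_append, ih]
    simp only [List.map_cons, List.map_nil, List.sum_cons, List.sum_nil]
    split_ifs <;> omega

-- the key step: appending v ≥ 0 to the counted list changes cntA by the closed form B uses
theorem cntA_append (a : List Int) (v : Int) (hv : 0 ≤ v) :
    cntA (a ++ [v])
      = cntA a - (if v ≤ (a.length : Int) then (a.length : Int) - v + 1 else 0) := by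
  have hlen : (((a ++ [v]).length : Nat) : Int) = (a.length : Int) + 1 := by
    simp [List.length_append]
  have hgetv : PySem.List.pyGetD (a ++ [v]) (a.length : Int) 0 = v := by
    rw [PySem.List.pyGetD_natCast]
    simp [List.getD_eq_getElem?_getD]
  rw [cntA_eq_sum, cntA_eq_sum, hlen,
      PySem.List.pyRange_one_succ_right (by positivity), List.map_append, List.sum_append]
  have hmap : ∀ i ∈ PySem.List.pyRange 0 (a.length : Int) 1,
      ((PySem.List.pyRange i ((a.length : Int) + 1) 1).map
        (fun j => if PySem.List.pyGetD (a ++ [v]) j 0 < i + 1 then (-1 : Int) else 0)).sum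
      = ((PySem.List.pyRange i (a.length : Int) 1).map
          (fun j => if PySem.List.pyGetD a j 0 < i + 1 then (-1 : Int) else 0)).sum
        + (if v < i + 1 then (-1 : Int) else 0) := by
    intro i hi
    rw [PySem.List.mem_pyRange_one] at hi
    rw [PySem.List.pyRange_one_succ_right (le_of_lt hi.2), List.map_append, List.sum_append]
    congr 1
    · apply congrArg
      apply List.map_congr_left
      intro j hj
      rw [PySem.List.mem_pyRange_one] at hj
      have h0j : 0 ≤ j := le_trans hi.1 hj.1
      have hja : j < ((a ++ [v]).length : Int) := by rw [hlen]; omega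
      rw [PySem.List.pyGetD_eq_getElem (a ++ [v]) 0 h0j hja,
          PySem.List.pyGetD_eq_getElem a 0 h0j (by omega)]
      rw [List.getElem_append_left (by omega)]
    · simp [hgetv]
  rw [List.map_congr_left hmap]
  have hsplit : ((PySem.List.pyRange 0 (a.length : Int) 1).map (fun i =>
      ((PySem.List.pyRange i (a.length : Int) 1).map
        (fun j => if PySem.List.pyGetD a j 0 < i + 1 then (-1 : Int) else 0)).sum
      + (if v < i + 1 then (-1 : Int) else 0))).sum
      = ((PySem.List.pyRange 0 (a.length : Int) 1).map (fun i =>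
          ((PySem.List.pyRange i (a.length : Int) 1).map
            (fun j => if PySem.List.pyGetD a j 0 < i + 1 then (-1 : Int) else 0)).sum)).sum
        + ((PySem.List.pyRange 0 (a.length : Int) 1).map
            (fun i => if v < i + 1 then (-1 : Int) else 0)).sum := by
    rw [PySem.List.sum_map_add_int]
  rw [hsplit, pv_sum_ind a.length v hv]
  simp only [List.map_cons, List.map_nil, List.sum_cons, List.sum_nil]
  rw [PySem.List.pyRange_one_singleton]
  simp only [List.map_cons, List.map_nil, List.sum_cons, List.sum_nil, hgetv]
  split_ifs <;> omega

-- the membership test B uses equals A's list containment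
theorem pv_set_contains (overlap : List String) (w : String) :
    PySem.Set.contains (PySem.Set.ofList overlap) w = overlap.contains w := by
  simp [PySem.Set.contains, PySem.Set.mem_ofList]

-- the two first loops compute the same state
theorem pv_loop1_eq (overlap : List String) (seq1 : List String) :
    pvLoop1A overlap seq1 = pvLoop1B (PySem.Set.ofList overlap) seq1 := by
  unfold pvLoop1A pvLoop1B
  apply PySem.List.foldl_congr_mem
  intro st w _
  rw [pv_set_contains]
  by_cases h : overlap.contains w
  · simp only [h, if_true]
    rw [PySem.Dict.getD_insert_self]
  · simp

-- every value stored by B's first loop is nonnegative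
theorem pv_loop1B_vals (ov : PySem.Set String) (ws : List String)
    (st : PySem.Dict String Int × List Int)
    (h : ∀ k v, st.1.get? k = some v → 0 ≤ v) :
    ∀ k v, (ws.foldl (fun st w =>
      if PySem.Set.contains ov w then
        (st.1.insert w ((st.1.size : Int) + 1), st.2 ++ [(st.1.size : Int) + 1])
      else st) st).1.get? k = some v → 0 ≤ v := by
  induction ws generalizing st with
  | nil => exact h
  | cons w ws ih =>
    simp only [List.foldl_cons]
    by_cases hw : PySem.Set.contains ov w
    · simp only [hw, if_true]
      apply ih
      intro k v hk
      rw [PySem.Dict.get?_insert] at hk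
      by_cases hkw : k = w
      · simp [hkw] at hk; omega
      · exact h k v (by simpa [hkw] using hk)
    · simp only [hw]
      exact ih st h

theorem pv_getD_nonneg (idx : PySem.Dict String Int)
    (h : ∀ k v, idx.get? k = some v → 0 ≤ v) (w : String) : 0 ≤ idx.getD w 0 := by
  rw [PySem.Dict.getD_eq_get?_getD]
  cases hg : idx.get? w with
  | none => simp
  | some v => simpa using h w v hg

-- B's fused loop maintains (cntA of the list built so far, the list built so far)
theorem pv_loop2_inv (ov : PySem.Set String) (idx : PySem.Dict String Int)
    (hv : ∀ w, 0 ≤ idx.getD w 0) :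
    ∀ (ws : List String) (r : Int) (l : List Int), r = cntA l →
    ws.foldl (fun rs w =>
      if PySem.Set.contains ov w then
        ((if idx.getD w 0 ≤ (rs.2.length : Int) then rs.1 - ((rs.2.length : Int) - idx.getD w 0 + 1) else rs.1),
         rs.2 ++ [idx.getD w 0])
      else rs) (r, l)
    = (cntA (ws.foldl (fun l w => if PySem.Set.contains ov w then l ++ [idx.getD w 0] else l) l),
       ws.foldl (fun l w => if PySem.Set.contains ov w then l ++ [idx.getD w 0] else l) l) := by
  intro ws
  induction ws with
  | nil => intro r l hr; simp [hr]
  | cons w ws ih =>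
    intro r l hr
    simp only [List.foldl_cons]
    by_cases hw : PySem.Set.contains ov w
    · simp only [hw, if_true]
      apply ih
      rw [cntA_append l (idx.getD w 0) (hv w), hr]
      split_ifs <;> ring
    · simp only [hw]
      exact ih r l hr

-- ===== VERDICT (by name: the statement is the Claim_ definition above) =====
theorem compute_inverse_pairs_spec : Claim_equal_compute_inverse_pairs := by
  intro seq1 seq2 overlap max_seq_len _ _
  unfold Spec_compute_inverse_pairs
  have hvals : ∀ w, 0 ≤ (pvLoop1B (PySem.Set.ofList overlap) seq1).1.getD w 0 := by
    apply pv_getD_nonneg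
    apply pv_loop1B_vals
    intro k v hk
    simp [PySem.Dict.get?_empty] at hk
  have hseq2 : pvSeq2A overlap (pvLoop1B (PySem.Set.ofList overlap) seq1).1 seq2
      = seq2.foldl (fun l w => if PySem.Set.contains (PySem.Set.ofList overlap) w
          then l ++ [(pvLoop1B (PySem.Set.ofList overlap) seq1).1.getD w 0] else l) [] := by
    unfold pvSeq2A
    apply PySem.List.foldl_congr_mem
    intro acc w _
    rw [pv_set_contains]
  have hloop2 := pv_loop2_inv (PySem.Set.ofList overlap)
      (pvLoop1B (PySem.Set.ofList overlap) seq1).1 hvals seq2 0 [] (by rfl)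
  simp only [compute_inverse_pairs, compute_inverse_pairs_alt, pvLoop2B, pvPadB, pv_loop1_eq]
  rw [hseq2, hloop2]
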